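-- pv_equiv track=rewrite | github.com/xiaojunyang0805/StepReaderCNN-MVP | src/data/data_split.py | get_split_statistics
-- ===== SOURCE A (Python) =====
-- from typing import Dict, List, Tuple, Optional
--
-- def get_split_statistics(train_data: Dict, val_data: Dict, test_data: Dict) -> Dict:
--     """
--     Get statistics about data splits.
--
--     Args:
--         train_data: Training data dictionary
--         val_data: Validation data dictionary
--         test_data: Test data dictionary
--
--     Returns:
--         Dictionary with split statistics
--     """
--     stats = {
--         'train': {},
--         'val': {},
--         'test': {},
--         'total': {}
--     }
--
--     # Count per split
--     for split_name, split_data in [('train', train_data), ('val', val_data), ('test', test_data)]: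
--         for label, samples in split_data.items():
--             stats[split_name][label] = len(samples)
--
--     # Total counts
--     all_labels = set(train_data.keys()) | set(val_data.keys()) | set(test_data.keys())
--
--     for label in all_labels:
--         train_count = stats['train'].get(label, 0)
--         val_count = stats['val'].get(label, 0)
--         test_count = stats['test'].get(label, 0)
--         total_count = train_count + val_count + test_count
--
--         stats['total'][label] = total_count
--
--     # Add summary
--     stats['summary'] = {
--         'train_total': sum(stats['train'].values()),
--         'val_total': sum(stats['val'].values()),
--         'test_total': sum(stats['test'].values()),
--         'grand_total': sum(stats['total'].values())
--     }
--
--     return stats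
-- ===== SOURCE B (Python) =====
-- def get_split_statistics(train_data, val_data, test_data):
--     """Single fused pass: per-split counts and running totals accumulated together."""
--     per_split = {}
--     totals = {}
--     for split_name, split_data in [('train', train_data), ('val', val_data), ('test', test_data)]:
--         counts = {}
--         for label, samples in split_data.items():
--             n = len(samples)
--             counts[label] = n
--             totals[label] = totals.get(label, 0) + n
--         per_split[split_name] = counts
--     return {
--         'train': per_split['train'],
--         'val': per_split['val'],
--         'test': per_split['test'],
--         'total': totals,
--         'summary': {
--             'train_total': sum(per_split['train'].values()),
--             'val_total': sum(per_split['val'].values()),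
--             'test_total': sum(per_split['test'].values()),
--             'grand_total': sum(totals.values()),
--         },
--     }
-- ===== Notes on version B (the rewrite author's own statement) =====
-- stated objective: alternative
-- what changed: B fuses A's two phases into a single pass: while counting each split it accumulates the running totals dict with get(label,0)+n, so the set-union over all labels and the second per-label lookup pass disappear.
import Mathlib
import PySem

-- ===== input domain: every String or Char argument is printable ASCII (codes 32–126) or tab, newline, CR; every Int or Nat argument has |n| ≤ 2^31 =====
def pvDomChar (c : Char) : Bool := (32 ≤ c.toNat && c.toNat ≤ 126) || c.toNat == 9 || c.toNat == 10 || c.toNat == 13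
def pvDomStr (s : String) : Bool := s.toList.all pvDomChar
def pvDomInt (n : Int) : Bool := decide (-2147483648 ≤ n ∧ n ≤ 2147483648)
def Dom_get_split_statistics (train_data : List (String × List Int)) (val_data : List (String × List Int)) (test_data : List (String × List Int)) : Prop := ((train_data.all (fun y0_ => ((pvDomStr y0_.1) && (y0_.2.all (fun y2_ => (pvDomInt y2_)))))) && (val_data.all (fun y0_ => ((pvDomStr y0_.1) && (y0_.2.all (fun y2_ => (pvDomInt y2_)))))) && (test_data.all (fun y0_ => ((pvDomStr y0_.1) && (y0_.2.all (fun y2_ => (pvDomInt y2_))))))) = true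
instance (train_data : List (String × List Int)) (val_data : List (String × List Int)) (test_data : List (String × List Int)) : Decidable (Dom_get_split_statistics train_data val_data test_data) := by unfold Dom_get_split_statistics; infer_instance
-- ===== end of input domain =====

-- B fuses A's two phases into one pass: per-split counts and running totals are
-- accumulated together, so the set-union over labels and the per-label re-lookups disappear
-- (objective: alternative decomposition; the 'total' dict order differs only as Python dict
-- order, which dict equality ignores).

-- ===== PORT A =====
-- literal transliteration of A: three per-split count dicts, then a set union of all labels,
-- then a second pass over the label set doing .get lookups, then the summary.
def get_split_statistics (train_data : List (String × List Int)) (val_data : List (String × List Int)) (test_data : List (String × List Int)) : List (String × List (String × Int)) :=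
  let trainD := PySem.Dict.ofList train_data
  let valD := PySem.Dict.ofList val_data
  let testD := PySem.Dict.ofList test_data
  let statsTrain := trainD.items.foldl (fun d p => d.insert p.1 ((p.2.length : Int))) PySem.Dict.empty
  let statsVal := valD.items.foldl (fun d p => d.insert p.1 ((p.2.length : Int))) PySem.Dict.empty
  let statsTest := testD.items.foldl (fun d p => d.insert p.1 ((p.2.length : Int))) PySem.Dict.empty
  let allLabels := PySem.Set.union (PySem.Set.union (PySem.Set.ofList trainD.keys) valD.keys) testD.keys
  let statsTotal := allLabels.foldl
    (fun d label => d.insert label (statsTrain.getD label 0 + statsVal.getD label 0 + statsTest.getD label 0))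
    PySem.Dict.empty
  let summary : List (String × Int) :=
    [("train_total", statsTrain.values.sum), ("val_total", statsVal.values.sum),
     ("test_total", statsTest.values.sum), ("grand_total", statsTotal.values.sum)]
  [("train", statsTrain.items), ("val", statsVal.items), ("test", statsTest.items),
   ("total", statsTotal.items), ("summary", summary)]

-- ===== PORT B =====
-- one fused pass over a split: builds its count dict and threads the running totals dict
def pvAltSplit (pairs : List (String × List Int)) (totals : PySem.Dict String Int) :
    PySem.Dict String Int × PySem.Dict String Int :=
  (PySem.Dict.ofList pairs).items.foldl
    (fun acc p => (acc.1.insert p.1 ((p.2.length : Int)),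
                   acc.2.insert p.1 (acc.2.getD p.1 0 + (p.2.length : Int))))
    (PySem.Dict.empty, totals)

def get_split_statistics_alt (train_data : List (String × List Int)) (val_data : List (String × List Int)) (test_data : List (String × List Int)) : List (String × List (String × Int)) :=
  let tr := pvAltSplit train_data PySem.Dict.empty
  let va := pvAltSplit val_data tr.2
  let te := pvAltSplit test_data va.2
  [("train", tr.1.items), ("val", va.1.items), ("test", te.1.items), ("total", te.2.items),
   ("summary",
     [("train_total", tr.1.values.sum), ("val_total", va.1.values.sum),
      ("test_total", te.1.values.sum), ("grand_total", te.2.values.sum)])]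

-- ===== PRECONDITION & SPEC =====
def Spec_get_split_statistics (train_data : List (String × List Int)) (val_data : List (String × List Int)) (test_data : List (String × List Int)) (out : List (String × List (String × Int))) : Prop := out = get_split_statistics_alt train_data val_data test_data
instance (train_data : List (String × List Int)) (val_data : List (String × List Int)) (test_data : List (String × List Int)) (out : List (String × List (String × Int))) : Decidable (Spec_get_split_statistics train_data val_data test_data out) := by unfold Spec_get_split_statistics; infer_instance

-- ===== CLAIM (what is proved, stated in full; the proofs are below) =====
def Claim_equal_get_split_statistics : Prop := ∀ (train_data : List (String × List Int)) (val_data : List (String × List Int)) (test_data : List (String × List Int)), Dom_get_split_statistics train_data val_data test_data → Spec_get_split_statistics train_data val_data test_data (get_split_statistics train_data val_data test_data)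

-- ===== LEMMAS AND PROOFS =====

-- getD of B's fused totals loop: the running total at v grows by the summed lengths at key v
theorem pv_wfold_getD (L : List (String × List Int)) (d : PySem.Dict String Int) (v : String) :
    (L.foldl (fun d p => d.insert p.1 (d.getD p.1 0 + (p.2.length : Int))) d).getD v 0
      = d.getD v 0 + ((L.filter (fun p => p.1 == v)).map (fun p => (p.2.length : Int))).sum := by
  induction L generalizing d with
  | nil => simp
  | cons p L ih =>
    simp only [List.foldl_cons, ih, List.filter_cons]
    by_cases h : p.1 = v
    · rw [PySem.Dict.getD_insert]
      simp only [h, BEq.rfl, if_pos, List.map_cons, List.sum_cons]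
      ring
    · rw [PySem.Dict.getD_insert]
      have h' : v ≠ p.1 := fun hh => h hh.symm
      simp [h, h']

-- over fresh, pairwise-distinct keys, A's plain insert loop and B's getD-accumulating loop coincide
theorem pv_fresh_fold_eq (L : List (String × List Int)) (d : PySem.Dict String Int)
    (hn : (L.map Prod.fst).Nodup) (hf : ∀ p ∈ L, d.contains p.1 = false) :
    L.foldl (fun d p => d.insert p.1 ((p.2.length : Int))) d
      = L.foldl (fun d p => d.insert p.1 (d.getD p.1 0 + (p.2.length : Int))) d := by
  induction L generalizing d with
  | nil => rfl
  | cons p L ih =>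
    simp only [List.foldl_cons]
    have h0 : d.getD p.1 0 = 0 :=
      PySem.Dict.getD_of_not_contains d 0 (hf p (by simp))
    rw [h0, zero_add]
    refine ih _ (by simpa using hn.of_cons) ?_
    intro q hq
    have hne : q.1 ≠ p.1 := by
      have := (List.nodup_cons.mp hn).1
      intro h; exact this (h ▸ (List.mem_map_of_mem hq))
    rw [PySem.Dict.contains_insert]
    simp [hne, hf q (List.mem_cons_of_mem _ hq)]

-- a dict with Nodup keys is its key list paired with its lookups
theorem pv_items_eq_map_keys {κ ν : Type} [BEq κ] [LawfulBEq κ] (d : PySem.Dict κ ν) (d0 : ν)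
    (h : d.keys.Nodup) : d.items = d.keys.map (fun k => (k, d.getD k d0)) := by
  simp only [PySem.Dict.keys, List.map_map]
  conv_lhs => rw [← List.map_id d.items]
  refine List.map_congr_left ?_
  intro p hp
  have hp' : (p.1, p.2) ∈ d.items := by simpa using hp
  have hv : d.getD p.1 d0 = p.2 := PySem.Dict.getD_of_mem_items d hp' h d0
  simp [Function.comp, hv]

-- set(xs) | ys = set(xs ++ ys)
theorem pv_union_ofList (xs ys : List String) :
    PySem.Set.union (PySem.Set.ofList xs) ys = PySem.Set.ofList (xs ++ ys) := by
  simp [PySem.Set.union, PySem.Set.update, PySem.Set.ofList_eq_foldl, List.foldl_append]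

-- per-split count dict lookup = summed lengths at that key
theorem pv_split_getD (X : PySem.Dict String (List Int)) (hX : X.keys.Nodup) (k : String) :
    (X.items.foldl (fun d p => d.insert p.1 ((p.2.length : Int))) PySem.Dict.empty).getD k 0
      = ((X.items.filter (fun p => p.1 == k)).map (fun p => (p.2.length : Int))).sum := by
  rw [pv_fresh_fold_eq _ _ (by simpa [PySem.Dict.keys] using hX)
        (fun p _ => by simp [PySem.Dict.contains_empty]),
      pv_wfold_getD]
  simp

theorem pv_total_eq (t v s : List (String × List Int)) :
    (PySem.Set.union (PySem.Set.union (PySem.Set.ofList (PySem.Dict.ofList t).keys) (PySem.Dict.ofList v).keys) (PySem.Dict.ofList s).keys).foldl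
      (fun d label => d.insert label
        (((PySem.Dict.ofList t).items.foldl (fun d p => d.insert p.1 ((p.2.length : Int))) PySem.Dict.empty).getD label 0 +
         ((PySem.Dict.ofList v).items.foldl (fun d p => d.insert p.1 ((p.2.length : Int))) PySem.Dict.empty).getD label 0 +
         ((PySem.Dict.ofList s).items.foldl (fun d p => d.insert p.1 ((p.2.length : Int))) PySem.Dict.empty).getD label 0))
      PySem.Dict.empty
    = (PySem.Dict.ofList s).items.foldl (fun d p => d.insert p.1 (d.getD p.1 0 + (p.2.length : Int)))
        ((PySem.Dict.ofList v).items.foldl (fun d p => d.insert p.1 (d.getD p.1 0 + (p.2.length : Int)))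
          ((PySem.Dict.ofList t).items.foldl (fun d p => d.insert p.1 (d.getD p.1 0 + (p.2.length : Int))) PySem.Dict.empty)) := by
  have hL : ∀ X : PySem.Dict String (List Int), X.keys = X.items.map Prod.fst := by
    intro X; simp [PySem.Dict.keys]
  set Dt := PySem.Dict.ofList t with hDt
  set Dv := PySem.Dict.ofList v with hDv
  set Ds := PySem.Dict.ofList s with hDs
  set L : List (String × List Int) := Dt.items ++ (Dv.items ++ Ds.items) with hLdef
  -- fold the RHS into one fold over L
  rw [← List.foldl_append, ← List.foldl_append]
  -- the label set is the first-occurrence list of L's keys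
  have hset : PySem.Set.union (PySem.Set.union (PySem.Set.ofList Dt.keys) Dv.keys) Ds.keys
      = PySem.Set.ofList (L.map Prod.fst) := by
    rw [pv_union_ofList, pv_union_ofList]
    simp [hLdef, List.map_append, hL]
  have hnodupB : ((L.foldl (fun d p => d.insert p.1 (d.getD p.1 0 + (p.2.length : Int))) PySem.Dict.empty)).keys.Nodup := by
    have := PySem.Dict.nodup_keys_foldl_insert_key L Prod.fst
      (fun d p => d.getD p.1 0 + (p.2.length : Int)) PySem.Dict.empty (by simp [PySem.Dict.keys_empty])
    simpa using this
  apply PySem.Dict.ext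
  rw [hset]
  rw [PySem.Dict.items_foldl_insert_fresh (PySem.Set.ofList (L.map Prod.fst)) (fun l => l) _ PySem.Dict.empty
        (fun a _ => by simp [PySem.Dict.contains_empty])
        (by simp [PySem.Set.nodup_ofList])]
  rw [pv_items_eq_map_keys _ 0 hnodupB]
  have hkeysB : ((L.foldl (fun d p => d.insert p.1 (d.getD p.1 0 + (p.2.length : Int))) PySem.Dict.empty)).keys
      = PySem.Set.ofList (L.map Prod.fst) := by
    have := PySem.Dict.keys_foldl_insert_key L Prod.fst
      (fun d p => d.getD p.1 0 + (p.2.length : Int)) PySem.Dict.empty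
    simpa [PySem.Dict.keys_empty, PySem.Set.update, PySem.Set.ofList_eq_foldl] using this
  rw [hkeysB]
  rw [show (PySem.Dict.empty : PySem.Dict String Int).items = [] from rfl, List.nil_append]
  refine List.map_congr_left ?_
  intro k _
  have hnt : Dt.keys.Nodup := PySem.Dict.nodup_keys_ofList t
  have hnv : Dv.keys.Nodup := PySem.Dict.nodup_keys_ofList v
  have hns : Ds.keys.Nodup := PySem.Dict.nodup_keys_ofList s
  rw [pv_split_getD Dt hnt k, pv_split_getD Dv hnv k, pv_split_getD Ds hns k, pv_wfold_getD]
  simp [hLdef, List.filter_append]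
  ring


-- ===== VERDICT (by name: the statement is the Claim_ definition above) =====
theorem get_split_statistics_spec : Claim_equal_get_split_statistics := by
  intro t v s _
  show get_split_statistics t v s = get_split_statistics_alt t v s
  simp only [get_split_statistics, get_split_statistics_alt, pvAltSplit]
  rw [PySem.List.foldl_prod_mk (fun (d : PySem.Dict String Int) (p : String × List Int) => d.insert p.1 ((p.2.length : Int)))
        (fun (d : PySem.Dict String Int) (p : String × List Int) => d.insert p.1 (d.getD p.1 0 + (p.2.length : Int)))
        (PySem.Dict.ofList t).items PySem.Dict.empty PySem.Dict.empty,
      PySem.List.foldl_prod_mk (fun (d : PySem.Dict String Int) (p : String × List Int) => d.insert p.1 ((p.2.length : Int)))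
        (fun (d : PySem.Dict String Int) (p : String × List Int) => d.insert p.1 (d.getD p.1 0 + (p.2.length : Int))),
      PySem.List.foldl_prod_mk (fun (d : PySem.Dict String Int) (p : String × List Int) => d.insert p.1 ((p.2.length : Int)))
        (fun (d : PySem.Dict String Int) (p : String × List Int) => d.insert p.1 (d.getD p.1 0 + (p.2.length : Int)))]
  rw [pv_total_eq]
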